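-- pv_equiv track=rewrite | github.com/rhender007/codesignal_problems | IsBeautifulString/isBeautifulString.py | solution
-- ===== SOURCE A (Python) =====
-- def solution(inputString):
--     dict_d = dict()
--
--     for char in inputString:
--         # check to see if char number in the dict
--         if char in dict_d:
--             dict_d[char] += 1
--         else:
--             dict_d[char] = 1
--
--     # go through the keys and make sure we have count b<a, c<b, etc.
--     for i in dict_d.keys():
--         # base case, continue
--         if i == 'a':
--             continue
--         if chr(ord(i)-1) in dict_d:
--             # if any letter count is greater than the prev alpha letter count, ret False
--             if dict_d[i] > dict_d[chr(ord(i)-1)]: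
--                 return False
--         else:
--             return False
--     return True
-- ===== SOURCE B (Python) =====
-- def solution(inputString):
--     counts = {}
--     for ch in inputString:
--         counts[ch] = counts.get(ch, 0) + 1
--     chars = sorted(counts)
--     if not chars:
--         return True
--     if chars[0] != 'a':
--         return False
--     for prev, curr in zip(chars, chars[1:]):
--         if ord(curr) - ord(prev) != 1 or counts[curr] > counts[prev]:
--             return False
--     return True
-- ===== Notes on version B (the rewrite author's own statement) =====
-- stated objective: alternative
-- what changed: Replaces A's per-key hash lookup of each character's predecessor by sorting the distinct characters once and doing a single adjacent scan (head must be 'a', consecutive ordinals differ by 1, counts non-increasing).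
import Mathlib
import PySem

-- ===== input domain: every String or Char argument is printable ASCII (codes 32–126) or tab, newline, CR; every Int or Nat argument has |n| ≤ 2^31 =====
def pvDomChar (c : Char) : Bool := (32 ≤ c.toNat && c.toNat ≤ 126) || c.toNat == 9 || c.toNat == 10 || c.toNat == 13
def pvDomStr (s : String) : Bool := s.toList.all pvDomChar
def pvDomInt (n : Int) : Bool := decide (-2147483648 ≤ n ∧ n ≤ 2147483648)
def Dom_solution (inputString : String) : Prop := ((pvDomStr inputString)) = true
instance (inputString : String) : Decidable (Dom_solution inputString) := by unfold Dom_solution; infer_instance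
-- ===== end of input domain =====

-- B replaces A's per-key predecessor hash lookup by a sort of the distinct characters
-- followed by one adjacent scan (alternative decomposition, same exact behaviour).

-- ===== PORT A =====
-- chr(ord(i) - 1)
def predChar (c : Char) : Char := Char.ofNat (c.toNat - 1)

-- the second 'for i in dict_d.keys()' loop of A, with its early returns
def loopA (d : PySem.Dict Char Int) : List Char → Bool
  | [] => true
  | i :: rest =>
    if i = 'a' then loopA d rest
    else if d.contains (predChar i) then
      if d.getD i 0 > d.getD (predChar i) 0 then false else loopA d rest
    else false

def solution (inputString : String) : Bool :=
  let dict_d := inputString.toList.foldl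
    (fun d c => if d.contains c then d.insert c (d.getD c 0 + 1) else d.insert c 1)
    PySem.Dict.empty
  loopA dict_d dict_d.keys

-- ===== PORT B =====
-- the 'for prev, curr in zip(chars, chars[1:])' scan of B
def chainB (counts : PySem.Dict Char Int) : Char → List Char → Bool
  | _, [] => true
  | prev, curr :: rest =>
    if (curr.toNat : Int) - (prev.toNat : Int) ≠ 1 ∨ counts.getD curr 0 > counts.getD prev 0
    then false
    else chainB counts curr rest

def solution_alt (inputString : String) : Bool :=
  let counts := inputString.toList.foldl
    (fun d c => d.insert c (d.getD c 0 + 1)) PySem.Dict.empty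
  match PySem.List.sorted counts.keys (fun x => x) false with
  | [] => true
  | c0 :: rest => if c0 ≠ 'a' then false else chainB counts c0 rest

-- ===== PRECONDITION & SPEC =====
def Spec_solution (inputString : String) (out : Bool) : Prop := out = solution_alt inputString
instance (inputString : String) (out : Bool) : Decidable (Spec_solution inputString out) := by unfold Spec_solution; infer_instance

-- ===== CLAIM (what is proved, stated in full; the proofs are below) =====
def Claim_equal_solution : Prop := ∀ (inputString : String), Dom_solution inputString → Spec_solution inputString (solution inputString)

-- ===== LEMMAS AND PROOFS =====

-- what A's key loop checks for a single key
def GoodA (d : PySem.Dict Char Int) (c : Char) : Prop :=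
  c = 'a' ∨ (d.contains (predChar c) = true ∧ d.getD c 0 ≤ d.getD (predChar c) 0)

theorem toNat_ofNat_lt {n : Nat} (h : n < 55296) : (Char.ofNat n).toNat = n := by
  rw [Char.ofNat]
  split
  · rfl
  · rename_i hv; exact absurd (Or.inl (by omega)) hv

theorem char_eq_of_toNat (c d : Char) (h : c.toNat = d.toNat) : c = d :=
  Char.ext (UInt32.toNat_inj.mp h)

theorem predChar_toNat {c : Char} (h : c.toNat ≤ 126) : (predChar c).toNat = c.toNat - 1 := by
  unfold predChar
  exact toNat_ofNat_lt (by omega)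

theorem loopA_iff (d : PySem.Dict Char Int) (L : List Char) :
    loopA d L = true ↔ ∀ c ∈ L, GoodA d c := by
  induction L with
  | nil => simp [loopA]
  | cons i rest ih =>
    simp only [loopA, List.mem_cons]
    by_cases ha : i = 'a'
    · simp [ha, ih, GoodA]
    · simp only [if_neg ha]
      by_cases hc : d.contains (predChar i) = true
      · simp only [if_pos hc]
        by_cases hg : d.getD i 0 > d.getD (predChar i) 0
        · simp only [if_pos hg]
          constructor
          · intro h; cases h
          · intro h
            rcases h i (Or.inl rfl) with h' | ⟨_, hle⟩
            · exact absurd h' ha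
            · omega
        · simp only [if_neg hg, ih]
          constructor
          · intro h c hm
            rcases hm with rfl | hm
            · exact Or.inr ⟨hc, by omega⟩
            · exact h c hm
          · intro h c hm; exact h c (Or.inr hm)
      · simp only [if_neg hc]
        constructor
        · intro h; cases h
        · intro h
          rcases h i (Or.inl rfl) with h' | ⟨h', _⟩
          · exact absurd h' ha
          · exact absurd h' hc

theorem chain_iff (d : PySem.Dict Char Int) (S : List Char)
    (hval : ∀ c ∈ S, 9 ≤ c.toNat ∧ c.toNat ≤ 126)
    (hS : S.Pairwise (· < ·))
    (hmem : ∀ c, d.contains c = true ↔ c ∈ S) :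
    ∀ (rest : List Char) (p : Char) (pre : List Char),
      S = pre ++ p :: rest → 'a' ≤ p →
      (chainB d p rest = true ↔ ∀ c ∈ rest, GoodA d c) := by
  intro rest
  induction rest with
  | nil => intro p pre hSeq hp; simp [chainB]
  | cons c rest' ih =>
    intro p pre hSeq hp
    have hmemS : ∀ x ∈ pre, x < p := by
      intro x hx
      have := (List.pairwise_append.mp (hSeq ▸ hS)).2.2 x hx p (List.mem_cons_self)
      exact this
    have hpc : p < c := by
      have := (List.pairwise_append.mp (hSeq ▸ hS)).2.1
      exact (List.pairwise_cons.mp this).1 c (List.mem_cons_self)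
    have hcrest : ∀ x ∈ rest', c < x := by
      have := (List.pairwise_append.mp (hSeq ▸ hS)).2.1
      have := (List.pairwise_cons.mp (List.pairwise_cons.mp this).2).1
      exact this
    have hvp : 9 ≤ p.toNat ∧ p.toNat ≤ 126 := hval p (by rw [hSeq]; simp)
    have hvc : 9 ≤ c.toNat ∧ c.toNat ≤ 126 := hval c (by rw [hSeq]; simp)
    have hca : c ≠ 'a' := by
      intro h
      have h1 : p.toNat < c.toNat := hpc
      have h2 : Char.toNat 'a' ≤ p.toNat := hp
      rw [h] at h1
      omega
    have hpredc : (predChar c).toNat = c.toNat - 1 := predChar_toNat hvc.2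
    by_cases hcond : (c.toNat : Int) - (p.toNat : Int) ≠ 1 ∨ d.getD c 0 > d.getD p 0
    · rw [chainB, if_pos hcond]
      constructor
      · intro h; cases h
      · intro h
        exfalso
        rcases h c (List.mem_cons_self) with h' | ⟨hct, hle⟩
        · exact hca h'
        · -- predChar c ∈ S; locate it
          have hmemc : predChar c ∈ S := (hmem _).mp hct
          have h2 : p.toNat < c.toNat := hpc
          rw [hSeq] at hmemc
          rcases List.mem_append.mp hmemc with hx | hx
          · have h1 : (predChar c).toNat < p.toNat := hmemS _ hx
            omega
          · rcases List.mem_cons.mp hx with he | hx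
            · -- predChar c = p : both disjuncts of hcond fail
              have h3 := congrArg Char.toNat he
              rcases hcond with h' | h'
              · exact h' (by omega)
              · rw [he] at hle; omega
            · rcases List.mem_cons.mp hx with he | hx
              · have h3 := congrArg Char.toNat he; omega
              · have h4 : c.toNat < (predChar c).toNat := hcrest _ hx
                omega
    · push Not at hcond
      obtain ⟨hdiff, hle⟩ := hcond
      rw [chainB, if_neg (by push Not; exact ⟨hdiff, hle⟩)]
      have hpc1 : predChar c = p := by
        apply char_eq_of_toNat
        omega
      have hgood : GoodA d c := Or.inr ⟨hpc1 ▸ (hmem p).mpr (by rw [hSeq]; simp), by rw [hpc1]; omega⟩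
      rw [ih c (pre ++ [p]) (by rw [hSeq]; simp) (le_of_lt (lt_of_le_of_lt hp hpc))]
      constructor
      · intro h x hx
        rcases List.mem_cons.mp hx with rfl | hx
        · exact hgood
        · exact h x hx
      · intro h x hx; exact h x (List.mem_cons_of_mem _ hx)

theorem alt_iff (d : PySem.Dict Char Int) (S : List Char)
    (hval : ∀ c ∈ S, 9 ≤ c.toNat ∧ c.toNat ≤ 126)
    (hS : S.Pairwise (· < ·))
    (hmem : ∀ c, d.contains c = true ↔ c ∈ S) :
    (match S with
      | [] => true
      | c0 :: rest => if c0 ≠ 'a' then false else chainB d c0 rest) = true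
      ↔ ∀ c ∈ S, GoodA d c := by
  cases S with
  | nil => simp
  | cons c0 rest =>
    show (if c0 ≠ 'a' then false else chainB d c0 rest) = true ↔ ∀ c ∈ c0 :: rest, GoodA d c
    have hvc0 : 9 ≤ c0.toNat ∧ c0.toNat ≤ 126 := hval c0 (List.mem_cons_self)
    by_cases h0 : c0 = 'a'
    · subst h0
      rw [if_neg (fun h => h rfl)]
      rw [chain_iff d _ hval hS hmem rest _ [] rfl (le_refl _)]
      constructor
      · intro h x hx
        rcases List.mem_cons.mp hx with rfl | hx
        · exact Or.inl rfl
        · exact h x hx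
      · intro h x hx; exact h x (List.mem_cons_of_mem _ hx)
    · simp only [ne_eq, h0, not_false_eq_true, if_true]
      constructor
      · intro h; cases h
      · intro h
        exfalso
        rcases h c0 (List.mem_cons_self) with h' | ⟨hct, _⟩
        · exact h0 h'
        · have hmemc : predChar c0 ∈ c0 :: rest := (hmem _).mp hct
          have hpredc : (predChar c0).toNat = c0.toNat - 1 := predChar_toNat hvc0.2
          rcases List.mem_cons.mp hmemc with he | hx
          · have := congrArg Char.toNat he; omega
          · have h1 : c0.toNat < (predChar c0).toNat := (List.pairwise_cons.mp hS).1 _ hx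
            omega

theorem dict_eq (xs : List Char) :
    xs.foldl (fun d c => if d.contains c then d.insert c (d.getD c 0 + 1) else d.insert c 1)
      PySem.Dict.empty = PySem.Dict.counter xs := by
  rw [← PySem.Dict.foldl_insert_getD_add_one_eq_counter]
  apply List.foldl_ext
  intro d c _
  by_cases h : d.contains c = true
  · simp [h]
  · have hz : d.getD c 0 = 0 := PySem.Dict.getD_of_not_contains d 0 (by simpa using h)
    simp [h, hz]

-- ===== VERDICT (by name: the statement is the Claim_ definition above) =====
theorem solution_spec : Claim_equal_solution := by
  intro s hdom
  unfold Spec_solution solution solution_alt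
  simp only [dict_eq, PySem.Dict.foldl_insert_getD_add_one_eq_counter]
  set d := PySem.Dict.counter s.toList with hd
  set S := PySem.List.sorted d.keys (fun x => x) false with hSdef
  have hkeys : d.keys = PySem.Set.ofList s.toList := PySem.Dict.keys_counter s.toList
  have hmemk : ∀ c, c ∈ d.keys ↔ c ∈ s.toList := by
    intro c; rw [hkeys]; exact PySem.Set.mem_ofList s.toList c
  have hmemS : ∀ c, c ∈ S ↔ c ∈ d.keys := by
    intro c; exact PySem.List.mem_sorted d.keys (fun x => x) false c
  have hval : ∀ c ∈ S, 9 ≤ c.toNat ∧ c.toNat ≤ 126 := by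
    intro c hc
    have : c ∈ s.toList := (hmemk c).mp ((hmemS c).mp hc)
    have hdc : pvDomChar c = true := by
      have := (List.all_eq_true.mp hdom) c this
      exact this
    unfold pvDomChar at hdc
    simp only [Bool.or_eq_true, Bool.and_eq_true, decide_eq_true_eq, beq_iff_eq] at hdc
    omega
  have hSpair : S.Pairwise (· < ·) := by
    rw [hSdef, hkeys]
    exact PySem.List.sorted_ofList_pairwise_lt s.toList
  have hmem : ∀ c, d.contains c = true ↔ c ∈ S := by
    intro c
    rw [PySem.Dict.contains_iff_mem_keys, hmemS]
  rw [Bool.eq_iff_iff, loopA_iff, alt_iff d S hval hSpair hmem]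
  constructor
  · intro h c hc; exact h c ((hmemS c).mp hc)
  · intro h c hc; exact h c ((hmemS c).mpr hc)
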